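-- pv_equiv track=rewrite | github.com/huangqiank/Algorithm | laiclass/hashmap/p.py | find_nearest_entry
-- ===== SOURCE A (Python) =====
-- def find_nearest_entry(arr):
--     word_dict = {}
--     dist = len(arr)
--     for i in range(len(arr)):
--         if arr[i] not in word_dict:
--             word_dict[arr[i]] = i
--         else:
--             dist = min(i - word_dict[arr[i]], dist)
--     return dist
-- ===== SOURCE B (Python) =====
-- def find_nearest_entry(arr):
--     first = {}
--     second = {}
--     for i, v in enumerate(arr):
--         if v not in first:
--             first[v] = i
--         elif v not in second:
--             second[v] = i
--     best = len(arr)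
--     for v, j in second.items():
--         best = min(best, j - first[v])
--     return best
-- ===== Notes on version B (the rewrite author's own statement) =====
-- stated objective: alternative
-- what changed: Instead of threading a running minimum through the single scan, B builds first- and second-occurrence index maps in one pass and then takes the minimum of second[v]-first[v] over the values seen at least twice (default len(arr)); this works because A's min over i-first(arr[i]) is always attained at the second occurrence.
import Mathlib
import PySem

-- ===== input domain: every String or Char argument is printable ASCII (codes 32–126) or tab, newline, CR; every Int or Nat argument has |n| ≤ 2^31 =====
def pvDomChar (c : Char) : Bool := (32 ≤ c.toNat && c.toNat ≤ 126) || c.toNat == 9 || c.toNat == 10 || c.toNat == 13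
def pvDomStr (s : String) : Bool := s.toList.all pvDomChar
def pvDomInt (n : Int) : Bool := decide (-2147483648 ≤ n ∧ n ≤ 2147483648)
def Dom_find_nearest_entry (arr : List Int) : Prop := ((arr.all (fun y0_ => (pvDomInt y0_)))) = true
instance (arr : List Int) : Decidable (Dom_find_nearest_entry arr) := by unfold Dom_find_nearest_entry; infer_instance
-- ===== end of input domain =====

-- B is an alternative same-cost decomposition: it records first and second occurrence
-- indices in one pass, then minimises second[v]-first[v] over values seen twice.

-- ===== PORT A =====
-- loop body of A: state = (word_dict, dist); arr[i] read via enumerate (indices of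
-- range(len(arr)) are always in range, so this is exact)
def pvStepA (st : PySem.Dict Int Int × Int) (p : Int × Int) : PySem.Dict Int Int × Int :=
  match st.1.get? p.2 with
  | none => (st.1.insert p.2 p.1, st.2)
  | some j => (st.1, min (p.1 - j) st.2)

def find_nearest_entry (arr : List Int) : Int :=
  ((PySem.List.enumerate arr 0).foldl pvStepA (PySem.Dict.empty, (arr.length : Int))).2

-- ===== PORT B =====
-- loop body of B: state = (first, second)
def pvStepB (st : PySem.Dict Int Int × PySem.Dict Int Int) (p : Int × Int) :
    PySem.Dict Int Int × PySem.Dict Int Int :=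
  if st.1.contains p.2 = false then (st.1.insert p.2 p.1, st.2)
  else if st.2.contains p.2 = false then (st.1, st.2.insert p.2 p.1)
  else st

def find_nearest_entry_alt (arr : List Int) : Int :=
  let st := (PySem.List.enumerate arr 0).foldl pvStepB (PySem.Dict.empty, PySem.Dict.empty)
  -- first[v]: always present for keys of second (proved below); getD 0 is never the default
  st.2.items.foldl (fun best q => min best (q.2 - st.1.getD q.1 0)) (arr.length : Int)

-- ===== PRECONDITION & SPEC =====
def Spec_find_nearest_entry (arr : List Int) (out : Int) : Prop := out = find_nearest_entry_alt arr
instance (arr : List Int) (out : Int) : Decidable (Spec_find_nearest_entry arr out) := by unfold Spec_find_nearest_entry; infer_instance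

-- ===== CLAIM (what is proved, stated in full; the proofs are below) =====
def Claim_equal_find_nearest_entry : Prop := ∀ (arr : List Int), Dom_find_nearest_entry arr → Spec_find_nearest_entry arr (find_nearest_entry arr)

-- ===== LEMMAS AND PROOFS =====

-- the final min-fold of B, abbreviated
def pvMinFold (N : Int) (f s : PySem.Dict Int Int) : Int :=
  s.items.foldl (fun best q => min best (q.2 - f.getD q.1 0)) N

theorem pvMinFold_le_init (g : Int × Int → Int) :
    ∀ (l : List (Int × Int)) (b : Int), l.foldl (fun b q => min b (g q)) b ≤ b := by
  intro l
  induction l with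
  | nil => intro b; simp
  | cons x l ih =>
      intro b
      simpa using le_trans (ih (min b (g x))) (min_le_left _ _)

theorem pvMinFold_le_mem (g : Int × Int → Int) :
    ∀ (l : List (Int × Int)) (b : Int), ∀ q ∈ l, l.foldl (fun b q => min b (g q)) b ≤ g q := by
  intro l
  induction l with
  | nil => intro b q hq; simp at hq
  | cons x l ih =>
      intro b q hq
      rcases List.mem_cons.mp hq with h | h
      · subst h
        simpa using le_trans (pvMinFold_le_init g l (min b (g q))) (min_le_right _ _)
      · simpa using ih (min b (g x)) q h

-- main loop invariant: running A's loop on (f, dist) and B's loop on (f, s) from any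
-- consistent pair of states yields A's dist = B's final min-fold
theorem pvLoop (xs : List Int) : ∀ (n : Int) (f s : PySem.Dict Int Int) (dist N : Int),
    f.keys.Nodup → s.keys.Nodup →
    (∀ q ∈ s.items, f.contains q.1 = true) →
    (∀ q ∈ s.items, q.2 ≤ n) →
    dist = pvMinFold N f s →
    ((PySem.List.enumerate xs n).foldl pvStepA (f, dist)).2 =
      pvMinFold N ((PySem.List.enumerate xs n).foldl pvStepB (f, s)).1
        ((PySem.List.enumerate xs n).foldl pvStepB (f, s)).2 := by
  induction xs with
  | nil => intro n f s dist N _ _ _ _ hdist; simpa [PySem.List.enumerate_nil] using hdist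
  | cons v xs ih =>
      intro n f s dist N hndf hnds hsub hle hdist
      rw [PySem.List.enumerate_cons]
      simp only [List.foldl_cons]
      rcases hget : f.get? v with _ | j
      · -- first occurrence: both insert into f
        have hcon : f.contains v = false := by
          rw [PySem.Dict.contains_eq_isSome_get?, hget]; rfl
        have hstepA : pvStepA (f, dist) (n, v) = (f.insert v n, dist) := by
          simp [pvStepA, hget]
        have hstepB : pvStepB (f, s) (n, v) = (f.insert v n, s) := by
          simp [pvStepB, hcon]
        rw [hstepA, hstepB]
        apply ih (n + 1) (f.insert v n) s dist N
        · exact PySem.Dict.nodup_keys_insert f v n hndf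
        · exact hnds
        · intro q hq
          rw [PySem.Dict.contains_insert]
          simp [hsub q hq]
        · intro q hq; exact le_trans (hle q hq) (by omega)
        · -- the fold is unchanged: no key of s equals v
          rw [hdist]
          unfold pvMinFold
          apply PySem.List.foldl_congr_mem
          intro b q hq
          have hne : q.1 ≠ v := by
            intro h
            have := hsub q hq
            rw [h, hcon] at this
            exact Bool.false_ne_true this
          rw [PySem.Dict.getD_insert_of_ne f n 0 hne]
      · -- v already in f
        have hconf : f.contains v = true := by
          rw [PySem.Dict.contains_eq_isSome_get?, hget]; rfl
        have hstepA : pvStepA (f, dist) (n, v) = (f, min (n - j) dist) := by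
          simp [pvStepA, hget]
        rw [hstepA]
        rcases hgets : s.get? v with _ | k
        · -- second occurrence: B records it in s
          have hcons : s.contains v = false := by
            rw [PySem.Dict.contains_eq_isSome_get?, hgets]; rfl
          have hstepB : pvStepB (f, s) (n, v) = (f, s.insert v n) := by
            simp [pvStepB, hconf, hcons]
          rw [hstepB]
          apply ih (n + 1) f (s.insert v n) (min (n - j) dist) N hndf
            (PySem.Dict.nodup_keys_insert s v n hnds)
          · intro q hq
            rcases (PySem.Dict.mem_items_insert s v n q).mp hq with h | h
            · rw [h]; exact hconf
            · exact hsub q h.1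
          · intro q hq
            rcases (PySem.Dict.mem_items_insert s v n q).mp hq with h | h
            · rw [h]; omega
            · exact le_trans (hle q h.1) (by omega)
          · unfold pvMinFold
            rw [PySem.Dict.items_insert_of_not_contains s n hcons, List.foldl_append]
            simp only [List.foldl_cons, List.foldl_nil]
            unfold pvMinFold at hdist
            rw [← hdist]
            rw [PySem.Dict.getD_of_get?_eq_some f 0 hget]
            exact min_comm _ _
        · -- third or later occurrence: B's state unchanged, A's min is a no-op
          have hcons : s.contains v = true := by
            rw [PySem.Dict.contains_eq_isSome_get?, hgets]; rfl
          have hstepB : pvStepB (f, s) (n, v) = (f, s) := by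
            simp [pvStepB, hconf, hcons]
          rw [hstepB]
          have hmem : (v, k) ∈ s.items := PySem.Dict.mem_items_of_get?_eq_some s hgets
          have h1 : dist ≤ k - f.getD v 0 := by
            rw [hdist]
            exact pvMinFold_le_mem (fun q => q.2 - f.getD q.1 0) s.items N (v, k) hmem
          have h2 : f.getD v 0 = j := PySem.Dict.getD_of_get?_eq_some f 0 hget
          have hk : k ≤ n := hle (v, k) hmem
          have : min (n - j) dist = dist := min_eq_right (by omega)
          rw [this]
          exact ih (n + 1) f s dist N hndf hnds hsub (fun q hq => le_trans (hle q hq) (by omega)) hdist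

-- ===== VERDICT (by name: the statement is the Claim_ definition above) =====
theorem find_nearest_entry_spec : Claim_equal_find_nearest_entry := by
  intro arr _
  unfold Spec_find_nearest_entry find_nearest_entry find_nearest_entry_alt
  have := pvLoop arr 0 PySem.Dict.empty PySem.Dict.empty (arr.length : Int) (arr.length : Int)
    (by simp) (by simp) (by simp [PySem.Dict.empty]) (by simp [PySem.Dict.empty])
    (by simp [pvMinFold, PySem.Dict.empty])
  simpa [pvMinFold] using this
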